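-- pv_equiv track=rewrite | github.com/scenerygraphics/sciview | scripts/list-deps.py | get_configs_for_ga
-- ===== SOURCE A (Python) =====
-- def get_configs_for_ga(ga, nodes, ga_to_resolved):
--     """Get configs for a G:A.
--
--     Tries to use the resolved version's configs. If the resolved version has no actual configs
--     (only metadata or nothing), looks for another version with actual configs.
--     """
--     resolved_version = ga_to_resolved.get(ga)
--
--     if resolved_version:
--         resolved_key = f"{ga}:{resolved_version}"
--         resolved_node = nodes.get(resolved_key, {})
--         configs = resolved_node.get("configurations", [])
--
--         # Filter to actual configs (non-metadata)
--         actual_configs = [c for c in configs if not c.endswith("DependenciesMetadata")]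
--         if actual_configs:
--             return actual_configs
--
--     # Fallback: look for any other version with actual configs
--     for key in nodes:
--         if key.startswith(ga + ":"):
--             configs = nodes[key].get("configurations", [])
--             # Filter to actual configs (non-metadata)
--             actual_configs = [c for c in configs if not c.endswith("DependenciesMetadata")]
--             if actual_configs:
--                 # Prefer non-test-only configs if available
--                 has_compile = "compileClasspath" in actual_configs
--                 has_runtime = "runtimeClasspath" in actual_configs
--                 if has_compile or has_runtime:
--                     return actual_configs
--
--     # Final fallback: return any actual configs we found
--     for key in nodes:
--         if key.startswith(ga + ":"):
--             configs = nodes[key].get("configurations", [])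
--             actual_configs = [c for c in configs if not c.endswith("DependenciesMetadata")]
--             if actual_configs:
--                 return actual_configs
--
--     return []
-- ===== SOURCE B (Python) =====
-- def get_configs_for_ga(ga, nodes, ga_to_resolved):
--     """Get configs for a G:A (single-pass fallback version)."""
--     resolved_version = ga_to_resolved.get(ga)
--
--     if resolved_version:
--         resolved_key = f"{ga}:{resolved_version}"
--         resolved_node = nodes.get(resolved_key, {})
--         configs = resolved_node.get("configurations", [])
--         actual_configs = [c for c in configs if not c.endswith("DependenciesMetadata")]
--         if actual_configs:
--             return actual_configs
--
--     # One scan: return the earliest version whose configs contain a classpath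
--     # config; otherwise remember the earliest version with any actual configs.
--     first_any = None
--     prefix = ga + ":"
--     for key in nodes:
--         if key.startswith(prefix):
--             configs = nodes[key].get("configurations", [])
--             actual_configs = [c for c in configs if not c.endswith("DependenciesMetadata")]
--             if actual_configs:
--                 if "compileClasspath" in actual_configs or "runtimeClasspath" in actual_configs:
--                     return actual_configs
--                 if first_any is None:
--                     first_any = actual_configs
--
--     return first_any if first_any is not None else []
-- ===== Notes on version B (the rewrite author's own statement) =====
-- stated objective: simpler
-- what changed: The two identical fallback scans over nodes (first for a classpath-containing version, then for any version with actual configs) are merged into one scan that returns immediately on a classpath match and otherwise remembers the earliest any-match in first_any.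
import Mathlib
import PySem

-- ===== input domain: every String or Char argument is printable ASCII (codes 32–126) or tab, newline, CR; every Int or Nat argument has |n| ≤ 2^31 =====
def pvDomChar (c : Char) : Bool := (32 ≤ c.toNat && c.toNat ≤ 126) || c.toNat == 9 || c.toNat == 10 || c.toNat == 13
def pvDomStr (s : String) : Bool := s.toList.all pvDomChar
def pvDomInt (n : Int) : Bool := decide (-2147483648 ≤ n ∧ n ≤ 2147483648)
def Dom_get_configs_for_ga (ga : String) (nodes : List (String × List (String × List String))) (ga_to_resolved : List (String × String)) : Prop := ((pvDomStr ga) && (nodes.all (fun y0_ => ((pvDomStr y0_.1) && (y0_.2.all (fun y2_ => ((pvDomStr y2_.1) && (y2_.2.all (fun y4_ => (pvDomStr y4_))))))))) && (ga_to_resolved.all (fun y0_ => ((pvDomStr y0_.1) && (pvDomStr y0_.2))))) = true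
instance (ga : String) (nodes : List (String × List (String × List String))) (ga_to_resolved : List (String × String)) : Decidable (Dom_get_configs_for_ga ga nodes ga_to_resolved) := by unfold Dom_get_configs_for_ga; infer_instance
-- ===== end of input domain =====

-- B merges A's two identical fallback scans into ONE scan that short-circuits on a
-- classpath match while remembering the earliest any-match (objective: simpler).

-- ===== PORT A =====
-- shared helper: '[c for c in nodes[key].get("configurations", []) if not c.endswith("DependenciesMetadata")]'
-- (this exact expression appears verbatim in both Pythons)
def pvActual (nodes : List (String × List (String × List String))) (key : String) : List String :=
  ((PySem.Dict.ofList (PySem.Dict.getD (PySem.Dict.ofList nodes) key [])).getD "configurations" []).filter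
    (fun c => !(PySem.Str.endswith c "DependenciesMetadata"))

-- shared helper: the resolved-version early-return block (verbatim in both Pythons);
-- 'if resolved_version:' is Python truthiness: None and "" are falsy
def pvResolved (ga : String) (nodes : List (String × List (String × List String))) (ga_to_resolved : List (String × String)) : Option (List String) :=
  match (PySem.Dict.ofList ga_to_resolved).get? ga with
  | none => none
  | some rv =>
    if rv = "" then none
    else
      let ac := pvActual nodes (ga ++ ":" ++ rv)
      if ac = [] then none else some ac

-- A's first fallback loop: first key with actual configs containing a classpath config
def pvLoopPref (ga : String) (nodes : List (String × List (String × List String))) : List String → Option (List String)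
  | [] => none
  | k :: rest =>
    if PySem.Str.startswith k (ga ++ ":") then
      let ac := pvActual nodes k
      if ac ≠ [] then
        if ac.contains "compileClasspath" || ac.contains "runtimeClasspath" then some ac
        else pvLoopPref ga nodes rest
      else pvLoopPref ga nodes rest
    else pvLoopPref ga nodes rest

-- A's second fallback loop: first key with any actual configs
def pvLoopAny (ga : String) (nodes : List (String × List (String × List String))) : List String → Option (List String)
  | [] => none
  | k :: rest =>
    if PySem.Str.startswith k (ga ++ ":") then
      let ac := pvActual nodes k
      if ac ≠ [] then some ac else pvLoopAny ga nodes rest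
    else pvLoopAny ga nodes rest

def get_configs_for_ga (ga : String) (nodes : List (String × List (String × List String))) (ga_to_resolved : List (String × String)) : List String :=
  match pvResolved ga nodes ga_to_resolved with
  | some ac => ac
  | none =>
    let ks := (PySem.Dict.ofList nodes).keys
    match pvLoopPref ga nodes ks with
    | some ac => ac
    | none =>
      match pvLoopAny ga nodes ks with
      | some ac => ac
      | none => []

-- ===== PORT B =====
-- B's single fallback loop, carrying first_any
def pvLoopB (ga : String) (nodes : List (String × List (String × List String))) : List String → Option (List String) → List String
  | [], firstAny => match firstAny with | some v => v | none => []
  | k :: rest, firstAny =>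
    if PySem.Str.startswith k (ga ++ ":") then
      let ac := pvActual nodes k
      if ac ≠ [] then
        if ac.contains "compileClasspath" || ac.contains "runtimeClasspath" then ac
        else pvLoopB ga nodes rest (match firstAny with | none => some ac | some v => some v)
      else pvLoopB ga nodes rest firstAny
    else pvLoopB ga nodes rest firstAny

def get_configs_for_ga_alt (ga : String) (nodes : List (String × List (String × List String))) (ga_to_resolved : List (String × String)) : List String :=
  match pvResolved ga nodes ga_to_resolved with
  | some ac => ac
  | none => pvLoopB ga nodes (PySem.Dict.ofList nodes).keys none

-- ===== PRECONDITION & SPEC =====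
def Spec_get_configs_for_ga (ga : String) (nodes : List (String × List (String × List String))) (ga_to_resolved : List (String × String)) (out : List String) : Prop := out = get_configs_for_ga_alt ga nodes ga_to_resolved
instance (ga : String) (nodes : List (String × List (String × List String))) (ga_to_resolved : List (String × String)) (out : List String) : Decidable (Spec_get_configs_for_ga ga nodes ga_to_resolved out) := by unfold Spec_get_configs_for_ga; infer_instance

-- ===== CLAIM (what is proved, stated in full; the proofs are below) =====
def Claim_equal_get_configs_for_ga : Prop := ∀ (ga : String) (nodes : List (String × List (String × List String))) (ga_to_resolved : List (String × String)), Dom_get_configs_for_ga ga nodes ga_to_resolved → Spec_get_configs_for_ga ga nodes ga_to_resolved (get_configs_for_ga ga nodes ga_to_resolved)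

-- ===== LEMMAS AND PROOFS =====

-- B's single scan equals A's two scans, for any key list and any pending first_any.
theorem pvLoopB_eq (ga : String) (nodes : List (String × List (String × List String))) :
    ∀ (ks : List String) (fa : Option (List String)),
      pvLoopB ga nodes ks fa =
        match pvLoopPref ga nodes ks with
        | some ac => ac
        | none =>
          match fa with
          | some v => v
          | none => match pvLoopAny ga nodes ks with | some ac => ac | none => [] := by
  intro ks
  induction ks with
  | nil => intro fa; simp [pvLoopB, pvLoopPref, pvLoopAny]
  | cons k rest ih =>
    intro fa
    simp only [pvLoopB, pvLoopPref, pvLoopAny]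
    split_ifs with h1 h2 h3
    · rfl
    · cases fa with
      | none => simp [ih]
      | some v => simp [ih]
    · exact ih fa
    · exact ih fa

theorem get_configs_for_ga_spec : Claim_equal_get_configs_for_ga := by
  intro ga nodes gtr _
  unfold Spec_get_configs_for_ga get_configs_for_ga get_configs_for_ga_alt
  cases h : pvResolved ga nodes gtr with
  | some ac => rfl
  | none => simp [pvLoopB_eq]
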